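-- pv_equiv track=rewrite | github.com/Adam-Jimenez/binarysearch-editorials | Concatenated Sums.py | solve
-- ===== SOURCE A (Python) =====
-- from collections import Counter
--
-- def solve(nums):
--     cnt=Counter([len(str(n)) for n in nums])
--     ans=0
--     for i,n in enumerate(nums):
--         ans+=n*len(nums) #bottom
--         # top
--         for l,freq in cnt.items():
--             ans+=freq*(n*10**l)
--     return ans
-- ===== SOURCE B (Python) =====
-- def solve(nums):
--     S = sum(10 ** len(str(n)) for n in nums)
--     return sum(nums) * (len(nums) + S)
-- ===== Notes on version B (the rewrite author's own statement) =====
-- stated objective: faster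
-- what changed: Replaced the nested loop over all (number, digit-length-frequency) pairs by a closed form: precompute S = sum of 10**len(str(n)) once, then answer = sum(nums) * (len(nums) + S), removing the Counter and both loops.
import Mathlib
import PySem

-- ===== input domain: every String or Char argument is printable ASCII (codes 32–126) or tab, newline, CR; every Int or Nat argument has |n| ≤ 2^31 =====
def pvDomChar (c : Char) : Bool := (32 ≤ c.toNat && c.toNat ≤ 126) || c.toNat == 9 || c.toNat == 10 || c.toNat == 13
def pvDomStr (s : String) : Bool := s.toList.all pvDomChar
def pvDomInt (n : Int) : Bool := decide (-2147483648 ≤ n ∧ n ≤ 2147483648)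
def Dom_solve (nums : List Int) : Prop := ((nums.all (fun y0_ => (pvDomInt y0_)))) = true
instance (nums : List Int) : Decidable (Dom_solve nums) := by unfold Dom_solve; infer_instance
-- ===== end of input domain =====

-- B replaces A's nested loop over (number, length-frequency) pairs by the closed form
-- sum(nums) * (len(nums) + S) with S = Σ 10^len(str(n)); objective: faster (constant factor).

-- ===== PORT A =====
def solve (nums : List Int) : Int :=
  let cnt : PySem.Dict Int Int :=
    PySem.Dict.counter (nums.map (fun n => ((PySem.Int.toStr n).length : Int)))
  let ans : Int := 0
  (PySem.List.enumerate nums 0).foldl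
    (fun ans p =>
      let n := p.2
      let ans := ans + n * (nums.length : Int)   -- bottom
      -- top
      cnt.items.foldl (fun ans q => ans + q.2 * (n * 10 ^ q.1.toNat)) ans)
    ans

-- ===== PORT B =====
def solve_alt (nums : List Int) : Int :=
  let S : Int := (nums.map (fun n => (10 : Int) ^ (PySem.Int.toStr n).length)).sum
  nums.sum * ((nums.length : Int) + S)

-- ===== PRECONDITION & SPEC =====
def Spec_solve (nums : List Int) (out : Int) : Prop := out = solve_alt nums
instance (nums : List Int) (out : Int) : Decidable (Spec_solve nums out) := by unfold Spec_solve; infer_instance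

-- ===== CLAIM (what is proved, stated in full; the proofs are below) =====
def Claim_equal_solve : Prop := ∀ (nums : List Int), Dom_solve nums → Spec_solve nums (solve nums)

-- ===== LEMMAS AND PROOFS =====

-- In a Nodup list containing x, summing 'if k = x then g k else 0' picks out g x.
theorem pv_sum_if_single (l : List Int) (g : Int → Int) (x : Int)
    (hnd : l.Nodup) (hx : x ∈ l) :
    (l.map (fun k => if k = x then g k else 0)).sum = g x := by
  induction l with
  | nil => cases hx
  | cons a t ih =>
    simp only [List.map_cons, List.sum_cons]
    rcases List.mem_cons.mp hx with rfl | hxt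
    · have : (t.map (fun k => if k = x then g k else 0)).sum = 0 := by
        apply List.sum_eq_zero
        intro y hy
        rcases List.mem_map.mp hy with ⟨k, hk, rfl⟩
        have : k ≠ x := fun h => (List.nodup_cons.mp hnd).1 (h ▸ hk)
        simp [this]
      simp [this]
    · have hax : a ≠ x := fun h => (List.nodup_cons.mp hnd).1 (h ▸ hxt)
      rw [if_neg hax, ih (List.nodup_cons.mp hnd).2 hxt]
      ring

-- Summing count-weighted g over the distinct elements equals summing g over the list.
theorem pv_count_dedup_sum (ls : List Int) (g : Int → Int) :
    ((PySem.Set.ofList ls).map (fun k => ((ls.count k : Int)) * g k)).sum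
      = (ls.map g).sum := by
  induction ls using List.reverseRecOn with
  | nil => simp [PySem.Set.ofList]
  | append_singleton ls x ih =>
    have hset : PySem.Set.ofList (ls ++ [x]) = PySem.Set.add (PySem.Set.ofList ls) x := by
      rw [PySem.Set.ofList_eq_foldl, PySem.Set.ofList_eq_foldl, List.foldl_append]
      rfl
    by_cases hx : x ∈ ls
    · have hadd : PySem.Set.add (PySem.Set.ofList ls) x = PySem.Set.ofList ls := by
        simp [PySem.Set.add, PySem.Set.contains, PySem.Set.mem_ofList, hx]
      rw [hset, hadd]
      have hmap : ((PySem.Set.ofList ls).map (fun k => (((ls ++ [x]).count k : Int)) * g k))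
          = (PySem.Set.ofList ls).map
              (fun k => ((ls.count k : Int)) * g k + (if k = x then g k else 0)) := by
        apply List.map_congr_left
        intro k _
        by_cases hkx : k = x
        · subst hkx
          simp [List.count_append]
          ring
        · simp [List.count_append, hkx, Ne.symm hkx]
      rw [hmap, List.sum_map_add, ih,
        pv_sum_if_single _ g x (PySem.Set.nodup_ofList ls) ((PySem.Set.mem_ofList ls x).mpr hx)]
      simp
    · have hadd : PySem.Set.add (PySem.Set.ofList ls) x = PySem.Set.ofList ls ++ [x] := by
        simp [PySem.Set.add, PySem.Set.contains, PySem.Set.mem_ofList, hx]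
      rw [hset, hadd, List.map_append, List.sum_append]
      have hmap : ((PySem.Set.ofList ls).map (fun k => (((ls ++ [x]).count k : Int)) * g k))
          = (PySem.Set.ofList ls).map (fun k => ((ls.count k : Int)) * g k) := by
        apply List.map_congr_left
        intro k hk
        have hkx : k ≠ x := fun h => hx (h ▸ (PySem.Set.mem_ofList ls k).mp hk)
        simp [List.count_append, Ne.symm hkx]
      rw [hmap, ih]
      simp [List.count_append, List.count_eq_zero_of_not_mem hx]

-- Σ (n*L + n*S) = (Σ n) * (L + S)
theorem pv_sum_linear (t : List Int) (L S : Int) :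
    (t.map (fun n => n * L + n * S)).sum = t.sum * (L + S) := by
  induction t with
  | nil => simp
  | cons a t ih =>
    simp only [List.map_cons, List.sum_cons]
    rw [ih]; ring

theorem solve_eq_alt (nums : List Int) : solve nums = solve_alt nums := by
  unfold solve solve_alt
  set ls := nums.map (fun n => ((PySem.Int.toStr n).length : Int)) with hls
  set L : Int := (nums.length : Int)
  set T : Int := ((PySem.Dict.counter ls).items.map (fun q => q.2 * 10 ^ q.1.toNat)).sum with hT
  -- inner loop adds n * T
  have hinner : ∀ (a n : Int),
      (PySem.Dict.counter ls).items.foldl (fun ans q => ans + q.2 * (n * 10 ^ q.1.toNat)) a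
        = a + n * T := by
    intro a n
    rw [PySem.List.foldl_add]
    have : ((PySem.Dict.counter ls).items.map (fun q => q.2 * (n * 10 ^ q.1.toNat))).sum
        = n * T := by
      rw [hT, ← List.sum_map_mul_left]
      congr 1
      apply List.map_congr_left
      intro q _
      ring
    rw [this]
  -- outer loop
  have houter : (PySem.List.enumerate nums 0).foldl
      (fun ans p =>
        (PySem.Dict.counter ls).items.foldl
          (fun ans q => ans + q.2 * (p.2 * 10 ^ q.1.toNat)) (ans + p.2 * L)) 0
      = 0 + ((PySem.List.enumerate nums 0).map (fun p => p.2 * L + p.2 * T)).sum := by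
    have hfun : (fun (ans : Int) (p : Int × Int) =>
        (PySem.Dict.counter ls).items.foldl
          (fun ans q => ans + q.2 * (p.2 * 10 ^ q.1.toNat)) (ans + p.2 * L))
        = fun ans p => ans + (p.2 * L + p.2 * T) := by
      funext a p
      rw [hinner (a + p.2 * L) p.2]
      ring
    rw [hfun, PySem.List.foldl_add]
  simp only [houter, zero_add]
  -- the enumerate sum is over the second components
  have hmap2 : ((PySem.List.enumerate nums 0).map (fun p => p.2 * L + p.2 * T))
      = nums.map (fun n => n * L + n * T) := by
    have := PySem.List.map_snd_enumerate nums 0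
    calc ((PySem.List.enumerate nums 0).map (fun p => p.2 * L + p.2 * T))
        = (((PySem.List.enumerate nums 0).map (·.2)).map (fun n => n * L + n * T)) := by
          rw [List.map_map]; rfl
      _ = nums.map (fun n => n * L + n * T) := by rw [this]
  rw [hmap2]
  -- T equals S
  have hTS : T = (nums.map (fun n => (10 : Int) ^ (PySem.Int.toStr n).length)).sum := by
    rw [hT, PySem.Dict.items_counter, List.map_map]
    have : ((fun q : Int × Int => q.2 * 10 ^ q.1.toNat) ∘
        fun k => (k, (ls.count k : Int))) = fun k => (ls.count k : Int) * 10 ^ k.toNat := rfl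
    rw [this, pv_count_dedup_sum ls (fun k => 10 ^ k.toNat), hls, List.map_map]
    congr 1
  rw [hTS]
  exact pv_sum_linear nums L _

-- ===== VERDICT (by name: the statement is the Claim_ definition above) =====
theorem solve_spec : Claim_equal_solve := by
  intro nums _
  unfold Spec_solve
  exact solve_eq_alt nums
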